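-- pv_equiv track=rewrite | github.com/BluePhoenix01/Coding-Bat | Recursion 1/nestParen.py | nestParen
-- ===== SOURCE A (Python) =====
-- def nestParen(str):
--     if len(str) == 0:
--         return True
--     if str[0] not in '()':
--         return nestParen(str[1:])
--     if str[-1] not in '()':
--         return nestParen(str[:-1])
--     # if str[0] not in ['(', ')']:
--     #     return nestParen(str[1:])
--     # if len(str) == 1:
--     #     return False
--     # end = 0
--     # start = 0
--     # if str[0] == '(':
--     #     end = -1
--     # if str[-1] == ')':
--     #     start = 1
--     # return nestParen(str[start:end])
--     if str[0] == '(' and str[-1] == ')':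
--         return nestParen(str[1:-1])
--     return False
-- ===== SOURCE B (Python) =====
-- def nestParen(str):
--     ps = [c for c in str if c in '()']
--     h = len(ps) // 2
--     return (len(ps) % 2 == 0
--             and all(c == '(' for c in ps[:h])
--             and all(c == ')' for c in ps[h:]))
-- ===== Notes on version B (the rewrite author's own statement) =====
-- stated objective: faster
-- what changed: Replaces A's recursive end-stripping with repeated O(n) string slicing by a single pass that extracts the paren characters and checks they form '('^k ')'^k by a halfway split.
import Mathlib
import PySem

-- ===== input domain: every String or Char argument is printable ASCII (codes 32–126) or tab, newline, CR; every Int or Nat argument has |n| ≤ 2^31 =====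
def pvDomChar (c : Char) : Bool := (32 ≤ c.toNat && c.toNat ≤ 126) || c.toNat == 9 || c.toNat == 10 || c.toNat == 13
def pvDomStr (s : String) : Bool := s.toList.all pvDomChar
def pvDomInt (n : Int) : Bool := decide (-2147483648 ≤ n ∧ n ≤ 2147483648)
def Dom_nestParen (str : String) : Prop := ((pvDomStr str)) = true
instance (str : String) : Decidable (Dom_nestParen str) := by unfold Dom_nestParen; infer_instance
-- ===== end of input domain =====

-- B replaces A's recursive end-stripping (repeated slicing) by one linear pass: extract the
-- paren characters and check they form '('^k followed by ')'^k via a halfway split.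

-- ===== PORT A =====
-- A recurses on the string: drops a non-paren first char (str[1:]), else a non-paren last
-- char (str[:-1]), else requires '('…')' and recurses on str[1:-1].
def nestParenAux (l : List Char) : Bool :=
  match l with
  | [] => true                                   -- len(str) == 0
  | c :: rest =>
    if ¬ (c = '(' ∨ c = ')') then nestParenAux rest          -- str[0] not in '()': str[1:]
    else
      match (c :: rest).getLast? with            -- str[-1] (the list is nonempty here)
      | none => false                            -- unreachable
      | some d =>
        if ¬ (d = '(' ∨ d = ')') then nestParenAux ((c :: rest).dropLast)   -- str[:-1]
        else if c = '(' ∧ d = ')' then nestParenAux rest.dropLast           -- str[1:-1]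
        else false
termination_by l.length
decreasing_by all_goals (simp [List.length_dropLast]; try omega)

def nestParen (str : String) : Bool := nestParenAux str.toList

-- ===== PORT B =====
def nestParen_alt (str : String) : Bool :=
  let ps := str.toList.filter (fun c => c == '(' || c == ')')
  let h := ps.length / 2
  decide (ps.length % 2 = 0)
    && (ps.take h).all (fun c => c == '(')
    && (ps.drop h).all (fun c => c == ')')

-- ===== PRECONDITION & SPEC =====
def Spec_nestParen (str : String) (out : Bool) : Prop := out = nestParen_alt str
instance (str : String) (out : Bool) : Decidable (Spec_nestParen str out) := by unfold Spec_nestParen; infer_instance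

-- ===== CLAIM (what is proved, stated in full; the proofs are below) =====
def Claim_equal_nestParen : Prop := ∀ (str : String), Dom_nestParen str → Spec_nestParen str (nestParen str)

-- ===== LEMMAS AND PROOFS =====

def pvIsParen (c : Char) : Bool := c == '(' || c == ')'

-- What A computes once the non-paren characters are gone: outermost pair, then the middle.
def pvCore : List Char → Bool
  | [] => true
  | c :: rest =>
    match rest.getLast? with
    | none => false
    | some d => decide (c = '(') && decide (d = ')') && pvCore rest.dropLast
termination_by l => l.length
decreasing_by all_goals (simp [List.length_dropLast]; try omega)

-- B's closed-form check, on the list of paren characters.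
def pvAltCheck (ps : List Char) : Bool :=
  decide (ps.length % 2 = 0)
    && (ps.take (ps.length / 2)).all (fun c => c == '(')
    && (ps.drop (ps.length / 2)).all (fun c => c == ')')

lemma pvCore_nil : pvCore [] = true := by rw [pvCore]

lemma pvCore_cons_concat (c d : Char) (mid : List Char) :
    pvCore (c :: (mid ++ [d])) = (decide (c = '(') && decide (d = ')') && pvCore mid) := by
  rw [pvCore]
  simp

lemma pvIsParen_false {c : Char} (h : ¬ (c = '(' ∨ c = ')')) : pvIsParen c = false := by
  simp only [pvIsParen, Bool.or_eq_false_iff, beq_eq_false_iff_ne, ne_eq]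
  exact ⟨fun h1 => h (Or.inl h1), fun h2 => h (Or.inr h2)⟩

lemma pvIsParen_true {c : Char} (h : c = '(' ∨ c = ')') : pvIsParen c = true := by
  rcases h with h | h <;> simp [pvIsParen, h]

lemma nestParenAux_eq_core (l : List Char) : nestParenAux l = pvCore (l.filter pvIsParen) := by
  induction l using nestParenAux.induct with
  | case1 => simp [nestParenAux, pvCore_nil]
  | case2 c rest hc ih =>
    rw [nestParenAux]
    simp [hc, pvIsParen_false hc, ih]
  | case3 c rest hc hlast =>
    simp at hlast
  | case4 c rest hc d hlast hd ih =>
    rw [not_not] at hc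
    obtain ⟨init, hinit⟩ := List.getLast?_eq_some_iff.mp hlast
    have hdl : (c :: rest).dropLast = init := by rw [hinit]; simp
    have hfil : (c :: rest).filter pvIsParen = init.filter pvIsParen := by
      rw [hinit]; simp [List.filter_append, pvIsParen_false hd]
    rw [nestParenAux, hlast]
    rw [hdl] at ih
    simp [hc, hd, ih, hfil, hdl]
  | case5 c rest hc d hlast hd hok ih =>
    rw [not_not] at hc hd
    obtain ⟨init, hinit⟩ := List.getLast?_eq_some_iff.mp hlast
    match init, hinit with
    | [], hinit =>
      -- c :: rest = [d] would force c = d, impossible with c = '(' and d = ')'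
      simp at hinit
      have hcd : c = d := hinit.1
      rw [hok.1, hok.2] at hcd
      exact absurd hcd (by decide)
    | i0 :: init', hinit =>
      have hci : c = i0 ∧ rest = init' ++ [d] := by
        have := hinit
        simp at this
        exact this
      have hrdl : rest.dropLast = init' := by rw [hci.2]; simp
      have hfil : (c :: rest).filter pvIsParen
          = c :: ((init'.filter pvIsParen) ++ [d]) := by
        rw [hci.2]
        simp [List.filter_append, pvIsParen_true hc, pvIsParen_true hd]
      rw [nestParenAux, hlast, hfil, pvCore_cons_concat]
      rw [hrdl] at ih
      simp [hok.1, hok.2, hrdl, ih]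
  | case6 c rest hc d hlast hd hok =>
    rw [not_not] at hc hd
    obtain ⟨init, hinit⟩ := List.getLast?_eq_some_iff.mp hlast
    have hbad : (decide (c = '(') && decide (d = ')')) = false := by
      by_cases h1 : c = '('
      · by_cases h2 : d = ')'
        · exact absurd ⟨h1, h2⟩ hok
        · simp [h2]
      · simp [h1]
    match init, hinit with
    | [], hinit =>
      simp at hinit
      rw [nestParenAux, hlast]
      have hfil : (c :: rest).filter pvIsParen = [c] := by
        rw [hinit.2]; simp [pvIsParen_true hc]
      rw [hfil, pvCore]
      simp [hc, hd, hok]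
    | i0 :: init', hinit =>
      have hci : c = i0 ∧ rest = init' ++ [d] := by simpa using hinit
      have hfil : (c :: rest).filter pvIsParen
          = c :: ((init'.filter pvIsParen) ++ [d]) := by
        rw [hci.2]
        simp [List.filter_append, pvIsParen_true hc, pvIsParen_true hd]
      rw [nestParenAux, hlast, hfil, pvCore_cons_concat]
      simp [hc, hd, hok, hbad]

lemma pvAltCheck_nil : pvAltCheck [] = true := by simp [pvAltCheck]

lemma pvAltCheck_singleton (c : Char) : pvAltCheck [c] = false := by
  simp [pvAltCheck]

lemma pvAltCheck_cons_concat (c d : Char) (mid : List Char) :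
    pvAltCheck (c :: (mid ++ [d])) = (decide (c = '(') && decide (d = ')') && pvAltCheck mid) := by
  unfold pvAltCheck
  rcases Nat.even_or_odd mid.length with he | ho
  · obtain ⟨k, hk⟩ := he
    have hmlen : mid.length = 2 * k := by omega
    have hlen : (c :: (mid ++ [d])).length = 2 * k + 2 := by simp [hmlen]
    have h2 : (c :: (mid ++ [d])).length / 2 = k + 1 := by rw [hlen]; omega
    have hm2 : mid.length / 2 = k := by rw [hmlen]; omega
    have htk : (mid ++ [d]).take k = mid.take k :=
      List.take_append_of_le_length (by omega)
    have hdk : (mid ++ [d]).drop k = mid.drop k ++ [d] :=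
      List.drop_append_of_le_length (by omega)
    rw [h2, hm2, List.take_succ_cons, List.drop_succ_cons, htk, hdk]
    have e1 : (c :: (mid ++ [d])).length % 2 = 0 := by simp [hmlen]; omega
    have e2 : mid.length % 2 = 0 := by omega
    rw [e1, e2]
    by_cases hc1 : c = '(' <;> by_cases hd1 : d = ')' <;>
      simp [hc1, hd1, Bool.and_comm, Bool.and_left_comm, Bool.and_assoc]
  · obtain ⟨k, hk⟩ := ho
    have h1 : ¬ ((mid.length + 1 + 1) % 2 = 0) := by omega
    have h2 : ¬ (mid.length % 2 = 0) := by omega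
    simp [h1, h2]

lemma core_eq_altCheck (ps : List Char) : pvCore ps = pvAltCheck ps := by
  induction ps using List.bidirectionalRec with
  | nil => rw [pvCore_nil, pvAltCheck_nil]
  | singleton c => rw [pvAltCheck_singleton, pvCore]; simp
  | cons_append c mid d ih =>
    rw [pvCore_cons_concat, pvAltCheck_cons_concat, ih]

-- ===== VERDICT (by name: the statement is the Claim_ definition above) =====
theorem nestParen_spec : Claim_equal_nestParen := by
  intro str _
  show nestParen str = nestParen_alt str
  unfold nestParen nestParen_alt
  rw [nestParenAux_eq_core, core_eq_altCheck]
  rfl
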